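-- pv_equiv track=rewrite | github.com/AsVoider/POWERSERVE_CUDA | tools/format.py | compact_consecutive_empty_lines
-- ===== SOURCE A (Python) =====
-- def is_empty(text: str) -> bool:
--     return text.strip() == ''
--
-- def compact_consecutive_empty_lines(text: str) -> str:
--     lines = text.split('\n')
--     new_lines = []
--     for i in range(len(lines)):
--         if i + 3 <= len(lines) and is_empty(lines[i]) and is_empty(lines[i + 1]) and is_empty(lines[i + 2]):
--             continue
--         else:
--             new_lines.append(lines[i])
--     return '\n'.join(new_lines)
-- ===== SOURCE B (Python) =====
-- def compact_consecutive_empty_lines(text: str) -> str: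
--     lines = text.split('\n')
--     out = []
--     n = len(lines)
--     i = 0
--     while i < n:
--         if lines[i].strip() == '':
--             j = i
--             while j < n and lines[j].strip() == '':
--                 j += 1
--             run = lines[i:j]
--             out.extend(run if len(run) < 3 else run[-2:])
--             i = j
--         else:
--             out.append(lines[i])
--             i += 1
--     return '\n'.join(out)
-- ===== Notes on version B (the rewrite author's own statement) =====
-- stated objective: alternative
-- what changed: B segments the lines into maximal runs of blank lines and reconstructs the output run by run (keeping the last two lines of any blank run of length >= 3), instead of A's per-index scan with a three-line lookahead.
import Mathlib
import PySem

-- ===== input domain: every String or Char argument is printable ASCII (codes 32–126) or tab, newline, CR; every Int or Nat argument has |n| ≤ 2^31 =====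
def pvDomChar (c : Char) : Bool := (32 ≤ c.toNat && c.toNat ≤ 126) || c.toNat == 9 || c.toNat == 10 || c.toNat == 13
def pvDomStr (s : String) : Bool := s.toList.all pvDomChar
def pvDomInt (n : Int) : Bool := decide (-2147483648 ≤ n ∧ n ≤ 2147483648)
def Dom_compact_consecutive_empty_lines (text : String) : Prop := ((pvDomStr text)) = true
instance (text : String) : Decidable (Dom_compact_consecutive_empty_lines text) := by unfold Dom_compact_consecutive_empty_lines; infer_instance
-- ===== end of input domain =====

-- B rebuilds the text from maximal runs of blank lines (keeping the last two of any run of ≥ 3)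
-- instead of A's per-index triple lookahead; objective: alternative decomposition, same cost.

-- ===== PORT A =====
-- Python helper is_empty: text.strip() == ''
def pvIsEmpty (s : String) : Bool := PySem.Str.strip s == ""

-- literal port of A: lines = text.split('\n'); for i in range(len(lines)): skip lines[i]
-- when i+3 <= len and lines[i..i+2] all blank. Indices i, i+1, i+2 are in range whenever
-- read (i < len; i+1, i+2 guarded by i+3 <= len), so getD with "" is exact here.
def compact_consecutive_empty_lines (text : String) : String :=
  let lines := (PySem.Str.split? text "\n").getD []
  let new_lines := (List.range lines.length).foldl (fun acc i =>
    if i + 3 ≤ lines.length ∧ pvIsEmpty (lines.getD i "") = true ∧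
        pvIsEmpty (lines.getD (i + 1) "") = true ∧ pvIsEmpty (lines.getD (i + 2) "") = true then
      acc
    else acc ++ [lines.getD i ""]) []
  PySem.Str.join "\n" new_lines

-- ===== PORT B =====
-- B's outer while-loop: at a blank line take the whole maximal blank run (inner scan =
-- takeWhile/dropWhile) and keep it if shorter than 3, else its last two lines (run[-2:]).
def pvCompactRuns : List String → List String
  | [] => []
  | a :: rest =>
    if pvIsEmpty a then
      let run := a :: rest.takeWhile pvIsEmpty
      let rest' := rest.dropWhile pvIsEmpty
      (if run.length < 3 then run else run.drop (run.length - 2)) ++ pvCompactRuns rest'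
    else a :: pvCompactRuns rest
termination_by l => l.length
decreasing_by
  · exact Nat.lt_succ_of_le (List.length_dropWhile_le _ _)
  · simp

def compact_consecutive_empty_lines_alt (text : String) : String :=
  PySem.Str.join "\n" (pvCompactRuns ((PySem.Str.split? text "\n").getD []))

-- ===== PRECONDITION & SPEC =====
def Spec_compact_consecutive_empty_lines (text : String) (out : String) : Prop := out = compact_consecutive_empty_lines_alt text
instance (text : String) (out : String) : Decidable (Spec_compact_consecutive_empty_lines text out) := by unfold Spec_compact_consecutive_empty_lines; infer_instance

-- ===== CLAIM (what is proved, stated in full; the proofs are below) =====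
def Claim_equal_compact_consecutive_empty_lines : Prop := ∀ (text : String), Dom_compact_consecutive_empty_lines text → Spec_compact_consecutive_empty_lines text (compact_consecutive_empty_lines text)

-- ===== LEMMAS AND PROOFS =====

-- structural reading of A's indexed loop: drop the head when the next two lines exist and
-- all three are blank
def pvGA : List String → List String
  | [] => []
  | a :: rest =>
    if 2 ≤ rest.length ∧ pvIsEmpty a = true ∧ pvIsEmpty (rest.getD 0 "") = true ∧
        pvIsEmpty (rest.getD 1 "") = true then
      pvGA rest
    else a :: pvGA rest

theorem foldA_eq_pvGA (lines : List String) : ∀ (acc : List String),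
    (List.range lines.length).foldl (fun acc i =>
      if i + 3 ≤ lines.length ∧ pvIsEmpty (lines.getD i "") = true ∧
          pvIsEmpty (lines.getD (i + 1) "") = true ∧ pvIsEmpty (lines.getD (i + 2) "") = true then
        acc
      else acc ++ [lines.getD i ""]) acc = acc ++ pvGA lines := by
  induction lines with
  | nil => intro acc; simp [pvGA]
  | cons a rest ih =>
    intro acc
    rw [List.length_cons, List.range_succ_eq_map, List.foldl_cons, List.foldl_map]
    have hstep : (fun (acc : List String) (i : Nat) =>
        if i + 1 + 3 ≤ rest.length + 1 ∧ pvIsEmpty ((a :: rest).getD (i + 1) "") = true ∧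
            pvIsEmpty ((a :: rest).getD (i + 1 + 1) "") = true ∧
            pvIsEmpty ((a :: rest).getD (i + 1 + 2) "") = true then
          acc
        else acc ++ [(a :: rest).getD (i + 1) ""]) =
        (fun (acc : List String) (i : Nat) =>
          if i + 3 ≤ rest.length ∧ pvIsEmpty (rest.getD i "") = true ∧
              pvIsEmpty (rest.getD (i + 1) "") = true ∧ pvIsEmpty (rest.getD (i + 2) "") = true then
            acc
          else acc ++ [rest.getD i ""]) := by
      funext acc i
      have h1 : i + 1 + 3 ≤ rest.length + 1 ↔ i + 3 ≤ rest.length := by omega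
      simp only [List.getD_cons_succ, h1]
    simp only [hstep, ih]
    rw [pvGA]
    have hc : (0 + 3 ≤ rest.length + 1 ∧ pvIsEmpty ((a :: rest).getD 0 "") = true ∧
        pvIsEmpty ((a :: rest).getD (0 + 1) "") = true ∧ pvIsEmpty ((a :: rest).getD (0 + 2) "") = true) ↔
        (2 ≤ rest.length ∧ pvIsEmpty a = true ∧ pvIsEmpty (rest.getD 0 "") = true ∧
          pvIsEmpty (rest.getD 1 "") = true) := by
      constructor
      · rintro ⟨h, ha, hb, hcc⟩
        exact ⟨by omega, by simpa using ha, by simpa using hb, by simpa using hcc⟩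
      · rintro ⟨h, ha, hb, hcc⟩
        exact ⟨by omega, by simpa using ha, by simpa using hb, by simpa using hcc⟩
    by_cases h : 2 ≤ rest.length ∧ pvIsEmpty a = true ∧ pvIsEmpty (rest.getD 0 "") = true ∧
        pvIsEmpty (rest.getD 1 "") = true
    · rw [if_pos (hc.mpr h), if_pos h]
    · rw [if_neg (fun hh => h (hc.mp hh)), if_neg h, List.append_assoc]
      rfl

-- dropping the first line of a blank run of length ≥ 3 does not change B's output
theorem pvDropLenSubTwoCons (a : String) (l : List String) (h : 2 ≤ l.length) :
    (a :: l).drop ((a :: l).length - 2) = l.drop (l.length - 2) := by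
  have e : (a :: l).length - 2 = (l.length - 2) + 1 := by simp only [List.length_cons]; omega
  rw [e, List.drop_succ_cons]

theorem pvCompactRuns_drop (a b c : String) (r : List String)
    (ha : pvIsEmpty a = true) (hb : pvIsEmpty b = true) (hc : pvIsEmpty c = true) :
    pvCompactRuns (a :: b :: c :: r) = pvCompactRuns (b :: c :: r) := by
  rw [pvCompactRuns, pvCompactRuns]
  simp only [ha, hb, hc, List.takeWhile_cons, if_true, List.dropWhile_cons]
  congr 1
  cases ht : r.takeWhile pvIsEmpty with
  | nil => simp
  | cons x xs =>
    rw [if_neg (by simp only [List.length_cons]; omega),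
      if_neg (by simp only [List.length_cons]; omega)]
    exact pvDropLenSubTwoCons a _ (by simp only [List.length_cons]; omega)

theorem pvGA_eq_pvCompactRuns (l : List String) : pvGA l = pvCompactRuns l := by
  induction l with
  | nil => simp [pvGA, pvCompactRuns]
  | cons a rest ih =>
    rw [pvGA]
    by_cases hEa : pvIsEmpty a = true
    · cases rest with
      | nil => simp [pvGA, pvCompactRuns, hEa]
      | cons b rest2 =>
        by_cases hEb : pvIsEmpty b = true
        · cases rest2 with
          | nil => simp [pvGA, pvCompactRuns, hEa, hEb]
          | cons c r =>
            by_cases hEc : pvIsEmpty c = true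
            · rw [if_pos ⟨by simp, hEa, by simpa using hEb, by simpa using hEc⟩, ih,
                pvCompactRuns_drop a b c r hEa hEb hEc]
            · rw [if_neg (by simp [hEc]), ih]
              simp [pvCompactRuns, hEa, hEb, hEc]
        · rw [if_neg (by simp [hEb]), ih]
          simp [pvCompactRuns, hEa, hEb]
    · rw [if_neg (by simp [hEa]), ih]
      simp [pvCompactRuns, hEa]

-- ===== VERDICT (by name: the statement is the Claim_ definition above) =====
theorem compact_consecutive_empty_lines_spec : Claim_equal_compact_consecutive_empty_lines := by
  intro text _
  unfold Spec_compact_consecutive_empty_lines compact_consecutive_empty_lines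
    compact_consecutive_empty_lines_alt
  simp only [foldA_eq_pvGA, List.nil_append, pvGA_eq_pvCompactRuns]
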